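-- pv_equiv track=rewrite | github.com/AllenInstitute/AllenSDK | allensdk/brain_observatory/behavior/stimulus_processing/__init__.py | _get_draw_epochs
-- ===== SOURCE A (Python) =====
-- from typing import Dict, List, Tuple, Union, Optional
--
-- def _get_draw_epochs(draw_log: List[int], start_frame: int,
--                      stop_frame: int) -> List[Tuple[int, int]]:
--     """
--     Gets the frame numbers of the active frames within a stimulus window.
--     Stimulus epochs come in the form [0, 0, 1, 1, 0, 0] where the stimulus is
--     active for some amount of time in the window indicated by int 1 at that
--     frame. This function returns the ranges for which the set_log is 1 within
--     the draw_log window.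
--     Parameters
--     ----------
--     draw_log: List[int]
--         A list of ints indicating for what frames stimuli were active
--     start_frame: int
--         The start frame to search within the draw_log for active values
--     stop_frame: int
--         The end frame to search within the draw_log for active values
--
--     Returns
--     -------
--     List[Tuple[int, int]]
--         A list of tuples indicating the start and end frames of every
--         contiguous set of active values within the specified window
--         of the draw log.
--     """
--     draw_epochs = []
--     current_frame = start_frame
--
--     while current_frame <= stop_frame:
--         epoch_length = 0
--         while current_frame < stop_frame and draw_log[current_frame] == 1:
--             epoch_length += 1
--             current_frame += 1
--         else:
--             current_frame += 1
--
--         if epoch_length: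
--             draw_epochs.append(
--                 (current_frame - epoch_length - 1, current_frame - 1,)
--             )
--
--     return draw_epochs
-- ===== SOURCE B (Python) =====
-- from typing import List, Tuple
--
-- def _get_draw_epochs(draw_log: List[int], start_frame: int,
--                      stop_frame: int) -> List[Tuple[int, int]]:
--     # Stage 1: boolean activity mask of the window.
--     active = [draw_log[i] == 1 for i in range(start_frame, stop_frame)]
--     # Stage 2: edge detection over a zero-padded mask (numpy.diff style):
--     # rising edges are epoch starts, falling edges are epoch ends.
--     padded = [False] + active + [False]
--     starts = [start_frame + i
--               for i in range(len(active))
--               if padded[i + 1] and not padded[i]]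
--     ends = [start_frame + i + 1
--             for i in range(len(active))
--             if padded[i + 1] and not padded[i + 2]]
--     # Stage 3: pair each rising edge with its falling edge.
--     return list(zip(starts, ends))
-- ===== Notes on version B (the rewrite author's own statement) =====
-- stated objective: alternative
-- what changed: Replaces A's nested while/while-else pointer walk with a staged edge-detection pipeline: build a boolean activity mask of the window, find rising and falling edges against a zero-padded mask (numpy.diff style), and zip the rising-edge indices with the falling-edge indices.
import Mathlib
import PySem

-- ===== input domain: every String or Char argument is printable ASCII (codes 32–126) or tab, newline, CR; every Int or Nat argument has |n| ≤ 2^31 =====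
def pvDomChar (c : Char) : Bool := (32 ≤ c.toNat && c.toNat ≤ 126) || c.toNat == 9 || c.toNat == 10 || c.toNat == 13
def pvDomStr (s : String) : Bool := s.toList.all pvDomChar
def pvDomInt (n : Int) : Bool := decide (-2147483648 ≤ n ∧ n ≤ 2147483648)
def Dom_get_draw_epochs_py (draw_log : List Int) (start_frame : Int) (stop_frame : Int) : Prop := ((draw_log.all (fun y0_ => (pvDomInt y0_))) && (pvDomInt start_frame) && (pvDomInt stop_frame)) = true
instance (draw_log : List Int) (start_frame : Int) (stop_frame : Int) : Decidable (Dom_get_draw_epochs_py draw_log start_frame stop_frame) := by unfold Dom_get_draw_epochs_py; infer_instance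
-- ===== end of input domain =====

-- B replaces A's nested while/while-else pointer walk by a staged edge-detection pipeline:
-- boolean mask, rising/falling edges against a zero-padded mask, zip (objective: alternative).

-- ===== PORT A =====
-- inner 'while current_frame < stop_frame and draw_log[current_frame] == 1' loop,
-- with explicit fuel (stop_frame - cf).toNat, sufficient since every iteration needs
-- cf < stop_frame and advances cf by 1; returns (current_frame, epoch_length) at exit
def pvInnerAGo (draw_log : List Int) (stop_frame : Int) : Nat → Int → Int → Int × Int
  | 0, cf, len => (cf, len)
  | Nat.succ n, cf, len =>
    if cf < stop_frame ∧ PySem.List.pyGet? draw_log cf = some 1 then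
      pvInnerAGo draw_log stop_frame n (cf + 1) (len + 1)
    else
      (cf, len)

def pvInnerA (draw_log : List Int) (stop_frame cf len : Int) : Int × Int :=
  pvInnerAGo draw_log stop_frame (stop_frame - cf).toNat cf len

-- outer 'while current_frame <= stop_frame' loop, accumulating draw_epochs; fuel
-- (stop_frame + 1 - cf).toNat suffices since every iteration needs cf ≤ stop_frame
-- and advances cf by at least 1
def pvOuterAGo (draw_log : List Int) (stop_frame : Int) : Nat → Int → List (Int × Int) → List (Int × Int)
  | 0, _, acc => acc
  | Nat.succ n, cf, acc =>
    if cf ≤ stop_frame then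
      let p := pvInnerA draw_log stop_frame cf 0
      -- 'else: current_frame += 1' of the while-else (always taken: no break)
      let cf' := p.1 + 1
      let acc' := if p.2 ≠ 0 then acc ++ [(cf' - p.2 - 1, cf' - 1)] else acc
      pvOuterAGo draw_log stop_frame n cf' acc'
    else
      acc

def get_draw_epochs_py (draw_log : List Int) (start_frame : Int) (stop_frame : Int) : List (Int × Int) :=
  pvOuterAGo draw_log stop_frame (stop_frame + 1 - start_frame).toNat start_frame []

-- ===== PORT B =====
-- Source B: activity mask, zero-padded edge detection, zip of rising with falling edges.
-- Python's padded[i], padded[i+1], padded[i+2] are read at 0 ≤ i < len(active), always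
-- in range of padded (length len(active)+2), so List.getD is exact here.
def get_draw_epochs_py_alt (draw_log : List Int) (start_frame : Int) (stop_frame : Int) : List (Int × Int) :=
  let active := (PySem.List.pyRange start_frame stop_frame 1).map
    (fun i => PySem.List.pyGet? draw_log i == some 1)
  let padded := [false] ++ active ++ [false]
  let starts := (List.range active.length).filterMap (fun i =>
    if padded.getD (i + 1) false && !(padded.getD i false) then some (start_frame + (i : Int)) else none)
  let ends := (List.range active.length).filterMap (fun i =>
    if padded.getD (i + 1) false && !(padded.getD (i + 2) false) then some (start_frame + (i : Int) + 1) else none)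
  starts.zip ends

-- ===== PRECONDITION & SPEC =====
-- Pre_ excludes exactly the inputs on which Python A raises IndexError: a nonempty window
-- reaching an index outside [-len(draw_log), len(draw_log)) (A reads every index in
-- [start_frame, stop_frame); B reads the same indices and raises there too).
def Pre_get_draw_epochs_py (draw_log : List Int) (start_frame : Int) (stop_frame : Int) : Prop :=
  stop_frame ≤ start_frame ∨
    (-(draw_log.length : Int) ≤ start_frame ∧ stop_frame ≤ (draw_log.length : Int))

instance (draw_log : List Int) (start_frame : Int) (stop_frame : Int) : Decidable (Pre_get_draw_epochs_py draw_log start_frame stop_frame) := by unfold Pre_get_draw_epochs_py; infer_instance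

def pvWitness_get_draw_epochs_py : List Int × Int × Int := ([0, 1, 1, 0, 1], 0, 5)

def Spec_get_draw_epochs_py (draw_log : List Int) (start_frame : Int) (stop_frame : Int) (out : List (Int × Int)) : Prop := out = get_draw_epochs_py_alt draw_log start_frame stop_frame
instance (draw_log : List Int) (start_frame : Int) (stop_frame : Int) (out : List (Int × Int)) : Decidable (Spec_get_draw_epochs_py draw_log start_frame stop_frame out) := by unfold Spec_get_draw_epochs_py; infer_instance

-- ===== CLAIM (what is proved, stated in full; the proofs are below) =====
def Claim_equal_get_draw_epochs_py : Prop := ∀ (draw_log : List Int) (start_frame : Int) (stop_frame : Int), Dom_get_draw_epochs_py draw_log start_frame stop_frame → Pre_get_draw_epochs_py draw_log start_frame stop_frame → Spec_get_draw_epochs_py draw_log start_frame stop_frame (get_draw_epochs_py draw_log start_frame stop_frame)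

-- ===== LEMMAS AND PROOFS =====

-- ---- shared vocabulary (proof-side only) ----
def pvKeyB (draw_log : List Int) (i : Int) : Bool :=
  PySem.List.pyGet? draw_log i == some 1

def pvMask (draw_log : List Int) (a b : Int) : List Bool :=
  (PySem.List.pyRange a b 1).map (pvKeyB draw_log)

-- reference run-peeling function over the index list (bridge between both ports)
def pvGoB (draw_log : List Int) : List Int → List (Int × Int)
  | [] => []
  | i :: rest =>
    let k := pvKeyB draw_log i
    let grp := i :: rest.takeWhile (fun j => pvKeyB draw_log j == k)
    let rest' := rest.dropWhile (fun j => pvKeyB draw_log j == k)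
    (if k then [(i, i + (grp.length : Int))] else []) ++ pvGoB draw_log rest'
termination_by l => l.length
decreasing_by
  have := List.length_dropWhile_le (fun j => pvKeyB draw_log j == k) rest
  simpa [rest'] using Nat.lt_succ_of_le this

-- ---- A-side: the pointer loops compute pvGoB ----

-- the inner loop advances by exactly the length of the run of active frames in [cf, stop)
theorem pvInnerAGo_spec (draw_log : List Int) (stop_frame : Int) :
    ∀ (n : Nat) (cf len : Int), (stop_frame - cf).toNat ≤ n →
    pvInnerAGo draw_log stop_frame n cf len
      = (cf + ((((PySem.List.pyRange cf stop_frame 1).takeWhile (pvKeyB draw_log)).length : Int)),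
         len + ((((PySem.List.pyRange cf stop_frame 1).takeWhile (pvKeyB draw_log)).length : Int))) := by
  intro n
  induction n with
  | zero =>
    intro cf len hn
    rw [PySem.List.pyRange_one_eq_nil (by omega)]
    simp [pvInnerAGo]
  | succ n ih =>
    intro cf len hn
    by_cases h : cf < stop_frame ∧ PySem.List.pyGet? draw_log cf = some 1
    · have hk : pvKeyB draw_log cf = true := by simp [pvKeyB, h.2]
      rw [pvInnerAGo, if_pos h, ih (cf + 1) (len + 1) (by omega),
        PySem.List.pyRange_one_cons h.1, List.takeWhile_cons_of_pos hk]
      simp [Prod.ext_iff]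
      constructor <;> ring
    · rw [pvInnerAGo, if_neg h]
      by_cases hlt : cf < stop_frame
      · have hk : pvKeyB draw_log cf = false := by
          simp only [not_and] at h
          simp [pvKeyB]
          intro hc
          exact (h hlt) hc
        rw [PySem.List.pyRange_one_cons hlt, List.takeWhile_cons_of_neg (by simp [hk])]
        simp
      · rw [PySem.List.pyRange_one_eq_nil (by omega)]
        simp

theorem pvInnerA_spec (draw_log : List Int) (stop_frame cf len : Int) :
    pvInnerA draw_log stop_frame cf len
      = (cf + ((((PySem.List.pyRange cf stop_frame 1).takeWhile (pvKeyB draw_log)).length : Int)),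
         len + ((((PySem.List.pyRange cf stop_frame 1).takeWhile (pvKeyB draw_log)).length : Int))) :=
  pvInnerAGo_spec draw_log stop_frame (stop_frame - cf).toNat cf len (le_refl _)

-- dropping the taken prefix of a consecutive index range leaves a consecutive index range
theorem pvRange_drop (P : Int → Bool) (b : Int) : ∀ (n : Nat) (a : Int), (b - a).toNat = n →
    (PySem.List.pyRange a b 1).dropWhile P
      = PySem.List.pyRange (a + (((PySem.List.pyRange a b 1).takeWhile P).length : Int)) b 1 := by
  intro n
  induction n with
  | zero =>
    intro a hn
    rw [PySem.List.pyRange_one_eq_nil (by omega)]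
    simp
    exact PySem.List.pyRange_one_eq_nil (show b ≤ a by omega)
  | succ n ih =>
    intro a hn
    rw [PySem.List.pyRange_one_cons (by omega)]
    by_cases hp : P a
    · rw [List.dropWhile_cons_of_pos hp, List.takeWhile_cons_of_pos hp]
      rw [ih (a + 1) (show (b - (a + 1)).toNat = n by omega)]
      congr 1
      simp [List.length_cons]
      ring
    · rw [List.dropWhile_cons_of_neg (by simp [hp]), List.takeWhile_cons_of_neg (by simp [hp])]
      simp
      exact (PySem.List.pyRange_one_cons (by omega)).symm

-- the taken prefix is at most the whole window
theorem pvTake_le (P : Int → Bool) (a b : Int) :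
    ((PySem.List.pyRange a b 1).takeWhile P).length ≤ (b - a).toNat := by
  have h := (List.takeWhile_prefix (l := PySem.List.pyRange a b 1) P).length_le
  simpa [PySem.List.length_pyRange_one] using h

-- if the run stops strictly before b, the frame right after the run is inactive
theorem pvTake_stop (P : Int → Bool) (a b : Int)
    (h : a + (((PySem.List.pyRange a b 1).takeWhile P).length : Int) < b) :
    P (a + (((PySem.List.pyRange a b 1).takeWhile P).length : Int)) = false := by
  have hd := pvRange_drop P b (b - a).toNat a rfl
  have hne : (PySem.List.pyRange a b 1).dropWhile P ≠ [] := by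
    rw [hd, PySem.List.pyRange_one_cons h]
    simp
  have hhead := List.head_dropWhile_not P hne
  have heq : ((PySem.List.pyRange a b 1).dropWhile P).head hne
      = a + (((PySem.List.pyRange a b 1).takeWhile P).length : Int) := by
    rw [List.head_eq_iff_head?_eq_some]
    rw [hd, PySem.List.pyRange_one_cons h]
    simp
  rwa [heq] at hhead

-- skipping a run of inactive frames does not change the run-peel output
theorem pvGoB_dropFalse (draw_log : List Int) (l : List Int) :
    pvGoB draw_log (l.dropWhile (fun j => !pvKeyB draw_log j)) = pvGoB draw_log l := by
  cases l with
  | nil => simp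
  | cons x rest =>
    by_cases hx : pvKeyB draw_log x
    · rw [List.dropWhile_cons_of_neg (by simp [hx])]
    · have hx' : pvKeyB draw_log x = false := by simpa using hx
      rw [List.dropWhile_cons_of_pos (by simp [hx'])]
      conv_rhs => rw [pvGoB]
      simp [hx']

-- main A-side invariant: the outer pointer loop from cf equals the run peel over range(cf, stop)
theorem pvOuterAGo_eq_goB (draw_log : List Int) (stop_frame : Int) :
    ∀ (n : Nat) (cf : Int) (acc : List (Int × Int)), (stop_frame + 1 - cf).toNat ≤ n →
    pvOuterAGo draw_log stop_frame n cf acc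
      = acc ++ pvGoB draw_log (PySem.List.pyRange cf stop_frame 1) := by
  intro n
  induction n with
  | zero =>
    intro cf acc hn
    rw [PySem.List.pyRange_one_eq_nil (by omega)]
    simp [pvOuterAGo, pvGoB]
  | succ n ih =>
    intro cf acc hn
    by_cases hcf : cf ≤ stop_frame
    · rw [pvOuterAGo, if_pos hcf]
      simp only [pvInnerA_spec]
      set L := ((PySem.List.pyRange cf stop_frame 1).takeWhile (pvKeyB draw_log)).length with hLdef
      have hLle : L ≤ (stop_frame - cf).toNat := pvTake_le _ _ _
      by_cases hL : L = 0
      · -- no active run starts at cf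
        simp only [hL]
        norm_num
        rw [ih (cf + 1) acc (by omega)]
        congr 1
        by_cases hlt : cf < stop_frame
        · have hk : pvKeyB draw_log cf = false := by
            by_contra hk
            have hk' : pvKeyB draw_log cf = true := by revert hk; simp
            rw [hLdef, PySem.List.pyRange_one_cons hlt, List.takeWhile_cons_of_pos hk'] at hL
            simp at hL
          rw [PySem.List.pyRange_one_cons hlt]
          conv_rhs => rw [pvGoB]
          simp [hk]
          exact (pvGoB_dropFalse draw_log (PySem.List.pyRange (cf + 1) stop_frame 1)).symm
        · rw [PySem.List.pyRange_one_eq_nil (by omega), PySem.List.pyRange_one_eq_nil (by omega)]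
      · -- an active run of length L starts at cf
        have hlt : cf < stop_frame := by
          by_contra hge
          rw [hLdef, PySem.List.pyRange_one_eq_nil (by omega)] at hL
          simp at hL
        have hk : pvKeyB draw_log cf = true := by
          by_contra hk
          have hk' : pvKeyB draw_log cf = false := by simpa using hk
          rw [hLdef, PySem.List.pyRange_one_cons hlt,
            List.takeWhile_cons_of_neg (by simp [hk'])] at hL
          simp at hL
        have hL1 : ((PySem.List.pyRange (cf + 1) stop_frame 1).takeWhile (pvKeyB draw_log)).length
            = L - 1 := by
          rw [hLdef, PySem.List.pyRange_one_cons hlt, List.takeWhile_cons_of_pos hk]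
          simp
        have hLpos : 1 ≤ L := by omega
        have happ : ((if ((0 : Int) + (L : Int) ≠ 0) then
            acc ++ [((cf + (L : Int)) + 1 - ((0 : Int) + (L : Int)) - 1, (cf + (L : Int)) + 1 - 1)]
            else acc)) = acc ++ [(cf, cf + (L : Int))] := by
          rw [if_pos (by omega)]
          norm_num
          omega
        rw [happ]
        rw [ih (cf + (L : Int) + 1) _ (by omega)]
        rw [List.append_assoc]
        congr 1
        rw [PySem.List.pyRange_one_cons hlt]
        conv_rhs => rw [pvGoB]
        simp only [hk, beq_true, if_true]
        have hdrop : (PySem.List.pyRange (cf + 1) stop_frame 1).dropWhile (pvKeyB draw_log)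
            = PySem.List.pyRange (cf + (L : Int)) stop_frame 1 := by
          rw [pvRange_drop (pvKeyB draw_log) stop_frame (stop_frame - (cf + 1)).toNat (cf + 1) rfl,
            hL1]
          congr 1
          omega
        have hlen : ((cf :: (PySem.List.pyRange (cf + 1) stop_frame 1).takeWhile
            (pvKeyB draw_log)).length : Int) = (L : Int) := by
          simp [hL1]
          omega
        rw [hdrop, hlen]
        congr 1
        have hLb : cf + (L : Int) ≤ stop_frame := by omega
        by_cases hend : cf + (L : Int) = stop_frame
        · rw [hend, PySem.List.pyRange_one_eq_nil (by omega),
            PySem.List.pyRange_one_eq_nil (by omega)]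
        · have hlt2 : cf + (L : Int) < stop_frame := lt_of_le_of_ne hLb hend
          have hkf : pvKeyB draw_log (cf + (L : Int)) = false := by
            have := pvTake_stop (pvKeyB draw_log) cf stop_frame (by rw [← hLdef] at *; omega)
            rwa [← hLdef] at this
          rw [PySem.List.pyRange_one_cons hlt2]
          conv_rhs => rw [pvGoB]
          simp [hkf]
          exact (pvGoB_dropFalse draw_log (PySem.List.pyRange (cf + (L : Int) + 1) stop_frame 1)).symm
    · rw [pvOuterAGo, if_neg hcf, PySem.List.pyRange_one_eq_nil (by omega)]
      simp [pvGoB]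

-- ---- B-side: edge lists in recursive form ----

-- rising-edge positions, threading the previous mask value p
def pvS (off : Int) (p : Bool) : List Bool → List Int
  | [] => []
  | b :: t => (if b && !p then [off] else []) ++ pvS (off + 1) b t

-- falling-edge positions (emitted as index-after-run)
def pvE (off : Int) : List Bool → List Int
  | [] => []
  | b :: t => (if b && !(t.headD false) then [off + 1] else []) ++ pvE (off + 1) t

-- appending a false never changes getD _ false
theorem pvGetD_append_false : ∀ (l : List Bool) (i : Nat), (l ++ [false]).getD i false = l.getD i false := by
  intro l
  induction l with
  | nil => intro i; cases i <;> simp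
  | cons b t ih =>
    intro i
    cases i with
    | zero => simp
    | succ n => simpa [List.getD] using ih n

-- the port's rising-edge comprehension is pvS
theorem pvS_filterMap : ∀ (l : List Bool) (off : Int) (p : Bool),
    (List.range l.length).filterMap (fun i =>
      if l.getD i false && !((p :: l).getD i false) then some (off + (i : Int)) else none)
      = pvS off p l := by
  intro l
  induction l with
  | nil => intro off p; simp [pvS]
  | cons b t ih =>
    intro off p
    rw [List.length_cons, List.range_succ_eq_map, List.filterMap_cons, List.filterMap_map]
    have h2 : ((fun i =>
        if (b :: t).getD i false && !((p :: b :: t).getD i false) then some (off + (i : Int)) else none)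
          ∘ Nat.succ)
        = (fun i => if t.getD i false && !((b :: t).getD i false) then some ((off + 1) + (i : Int)) else none) := by
      funext i
      simp only [Function.comp, List.getD_cons_succ]
      congr 1
      push_cast
      ring
    rw [h2, ih (off + 1) b]
    by_cases hb : b && !p
    · simp only [List.getD_cons_zero, hb, if_true, pvS]
      simp
    · simp only [List.getD_cons_zero, hb, pvS]
      simp

-- the port's falling-edge comprehension is pvE
theorem pvE_filterMap : ∀ (l : List Bool) (off : Int),
    (List.range l.length).filterMap (fun i =>
      if l.getD i false && !(l.getD (i + 1) false) then some (off + (i : Int) + 1) else none)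
      = pvE off l := by
  intro l
  induction l with
  | nil => intro off; simp [pvE]
  | cons b t ih =>
    intro off
    rw [List.length_cons, List.range_succ_eq_map, List.filterMap_cons, List.filterMap_map]
    have h2 : ((fun i =>
        if (b :: t).getD i false && !((b :: t).getD (i + 1) false) then some (off + (i : Int) + 1) else none)
          ∘ Nat.succ)
        = (fun i => if t.getD i false && !(t.getD (i + 1) false) then some ((off + 1) + (i : Int) + 1) else none) := by
      funext i
      simp only [Function.comp, List.getD_cons_succ]
      congr 1
      push_cast
      ring
    rw [h2, ih (off + 1)]
    have hhd : t.getD 0 false = t.headD false := by cases t <;> simp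
    by_cases hb : b && !(t.headD false)
    · simp only [List.getD_cons_zero, List.getD_cons_succ, hhd, hb, if_true, pvE]
      simp
    · simp only [List.getD_cons_zero, List.getD_cons_succ, hhd, hb, pvE]
      simp

-- pvS swallows a run of trues when the previous value is already true
theorem pvS_replicate : ∀ (j : Nat) (rest : List Bool) (off : Int),
    pvS off true (List.replicate j true ++ rest) = pvS (off + (j : Int)) true rest := by
  intro j
  induction j with
  | zero => intro rest off; simp
  | succ j ih =>
    intro rest off
    rw [List.replicate_succ, List.cons_append]
    simp only [pvS, Bool.not_true, Bool.and_false]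
    rw [if_neg (by simp), List.nil_append, ih rest (off + 1)]
    congr 1
    push_cast
    ring

-- pvE emits exactly the end of a (nonempty) run of trues followed by a false-or-end
theorem pvE_replicate : ∀ (j : Nat) (rest : List Bool) (off : Int), rest.headD false = false →
    pvE off (List.replicate j true ++ rest)
      = (if j = 0 then [] else [off + (j : Int)]) ++ pvE (off + (j : Int)) rest := by
  intro j
  induction j with
  | zero => intro rest off _; simp
  | succ j ih =>
    intro rest off hrest
    rw [List.replicate_succ, List.cons_append]
    simp only [pvE]
    rw [ih rest (off + 1) hrest]
    cases j with
    | zero =>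
      cases rest with
      | nil => simp [pvE]
      | cons r rs =>
        simp only [List.headD_cons] at hrest
        simp [hrest]
    | succ m =>
      have hh : ((List.replicate (m + 1) true ++ rest).headD false) = true := by
        rw [List.replicate_succ]; simp
      simp only [hh]
      norm_num
      constructor
      · ring
      · congr 1; ring

-- mapping the predicate over its own takeWhile gives all-true
theorem pvMap_takeWhile_self {α : Type} (p : α → Bool) : ∀ (l : List α),
    (l.takeWhile p).map p = List.replicate (l.takeWhile p).length true := by
  intro l
  induction l with
  | nil => simp
  | cons x t ih =>
    by_cases hx : p x
    · rw [List.takeWhile_cons_of_pos hx]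
      simp [hx, ih, List.replicate_succ]
    · rw [List.takeWhile_cons_of_neg (by simp [hx])]
      simp

-- the mask of a window splits as a true-run followed by the rest of the mask
theorem pvMask_split (draw_log : List Int) (a b : Int) :
    pvMask draw_log a b
      = List.replicate ((PySem.List.pyRange a b 1).takeWhile (pvKeyB draw_log)).length true
        ++ pvMask draw_log (a + (((PySem.List.pyRange a b 1).takeWhile (pvKeyB draw_log)).length : Int)) b := by
  unfold pvMask
  conv_lhs => rw [← List.takeWhile_append_dropWhile (p := pvKeyB draw_log) (l := PySem.List.pyRange a b 1)]
  rw [List.map_append, pvMap_takeWhile_self, pvRange_drop (pvKeyB draw_log) b (b - a).toNat a rfl]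

-- the element after the taken run is inactive or absent
theorem pvMask_rest_headD (draw_log : List Int) (a b : Int) :
    (pvMask draw_log (a + (((PySem.List.pyRange a b 1).takeWhile (pvKeyB draw_log)).length : Int)) b).headD false = false := by
  set c := a + (((PySem.List.pyRange a b 1).takeWhile (pvKeyB draw_log)).length : Int) with hc
  by_cases hlt : c < b
  · have hf : pvKeyB draw_log c = false := by
      rw [hc]; exact pvTake_stop (pvKeyB draw_log) a b (by rw [← hc]; omega)
    unfold pvMask
    rw [PySem.List.pyRange_one_cons hlt]
    simp [hf]
  · unfold pvMask
    rw [PySem.List.pyRange_one_eq_nil (by omega)]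
    simp

-- main B-side invariant: zipping rising with falling edges of the mask is the run peel
theorem pvZipSE_eq_goB (draw_log : List Int) (b : Int) : ∀ (n : Nat) (a : Int), (b - a).toNat = n →
    (pvS a false (pvMask draw_log a b)).zip (pvE a (pvMask draw_log a b))
      = pvGoB draw_log (PySem.List.pyRange a b 1) := by
  intro n
  induction n using Nat.strong_induction_on with
  | _ n ih =>
    intro a hn
    by_cases hlt : a < b
    · rw [show pvMask draw_log a b
          = pvKeyB draw_log a :: pvMask draw_log (a + 1) b by
        unfold pvMask; rw [PySem.List.pyRange_one_cons hlt]; simp]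
      by_cases hk : pvKeyB draw_log a
      · -- a run of actives of length L+1 starts at a
        set L := ((PySem.List.pyRange (a + 1) b 1).takeWhile (pvKeyB draw_log)).length with hLdef
        have hLle : L ≤ (b - (a + 1)).toNat := pvTake_le _ _ _
        have hsplit := pvMask_split draw_log (a + 1) b
        have hrest := pvMask_rest_headD draw_log (a + 1) b
        rw [← hLdef] at hsplit hrest
        rw [hk, hsplit]
        -- S side
        have hS : pvS a false
            (true :: (List.replicate L true ++ pvMask draw_log (a + 1 + (L : Int)) b))
            = a :: pvS (a + 1 + (L : Int)) true (pvMask draw_log (a + 1 + (L : Int)) b) := by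
          simp only [pvS]
          rw [pvS_replicate]
          simp
        -- E side: true :: replicate L ++ rest = replicate (L+1) ++ rest
        have hE : pvE a
            (true :: (List.replicate L true ++ pvMask draw_log (a + 1 + (L : Int)) b))
            = (a + (L : Int) + 1) :: pvE (a + 1 + (L : Int)) (pvMask draw_log (a + 1 + (L : Int)) b) := by
          rw [show (true :: (List.replicate L true ++ pvMask draw_log (a + 1 + (L : Int)) b))
              = List.replicate (L + 1) true ++ pvMask draw_log (a + 1 + (L : Int)) b by
            rw [List.replicate_succ, List.cons_append]]
          rw [pvE_replicate (L + 1) _ a hrest]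
          norm_num
          constructor
          · ring
          · congr 1; ring
        rw [hS, hE]
        -- RHS: peel the run
        rw [PySem.List.pyRange_one_cons hlt]
        conv_rhs => rw [pvGoB]
        simp only [hk, if_true]
        have hdrop : (PySem.List.pyRange (a + 1) b 1).dropWhile (fun j => pvKeyB draw_log j == true)
            = PySem.List.pyRange (a + 1 + (L : Int)) b 1 := by
          simp only [beq_true]
          rw [pvRange_drop (pvKeyB draw_log) b (b - (a + 1)).toNat (a + 1) rfl, ← hLdef]
        have htake : ((a :: (PySem.List.pyRange (a + 1) b 1).takeWhile
            (fun j => pvKeyB draw_log j == true)).length : Int) = (L : Int) + 1 := by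
          simp only [beq_true]
          rw [List.length_cons, ← hLdef]
          push_cast
          ring
        rw [hdrop, htake]
        -- split on whether the rest is empty
        by_cases hend : a + 1 + (L : Int) < b
        · have hkf : pvKeyB draw_log (a + 1 + (L : Int)) = false := by
            have := pvTake_stop (pvKeyB draw_log) (a + 1) b (by rw [← hLdef]; omega)
            rwa [← hLdef] at this
          have hmask2 : pvMask draw_log (a + 1 + (L : Int)) b
              = false :: pvMask draw_log (a + 1 + (L : Int) + 1) b := by
            unfold pvMask
            rw [PySem.List.pyRange_one_cons hend]
            simp [hkf]
          rw [hmask2]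
          simp only [pvS, pvE]
          norm_num
          rw [show a + 1 + (L : Int) + 1 = a + 2 + (L : Int) by ring]
          rw [ih (b - (a + 2 + (L : Int))).toNat (by omega) (a + 2 + (L : Int)) rfl]
          constructor
          · ring
          · -- peel the single false at the head of the remaining range
            rw [PySem.List.pyRange_one_cons hend]
            conv_rhs => rw [pvGoB]
            simp only [hkf]
            norm_num
            rw [show a + 1 + (L : Int) + 1 = a + 2 + (L : Int) by ring]
            exact (pvGoB_dropFalse draw_log (PySem.List.pyRange (a + 2 + (L : Int)) b 1)).symm
        · have hnil : pvMask draw_log (a + 1 + (L : Int)) b = [] := by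
            unfold pvMask
            rw [PySem.List.pyRange_one_eq_nil (by omega)]
            simp
          rw [hnil, PySem.List.pyRange_one_eq_nil (by omega)]
          simp [pvS, pvE, pvGoB]
          ring
      · -- inactive frame at a: both sides skip it
        have hk' : pvKeyB draw_log a = false := by simpa using hk
        rw [hk']
        simp only [pvS, pvE]
        norm_num
        rw [ih (b - (a + 1)).toNat (by omega) (a + 1) rfl]
        rw [PySem.List.pyRange_one_cons hlt]
        conv_rhs => rw [pvGoB]
        simp [hk']
        exact (pvGoB_dropFalse draw_log (PySem.List.pyRange (a + 1) b 1)).symm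
    · unfold pvMask
      rw [PySem.List.pyRange_one_eq_nil (by omega)]
      simp [pvS, pvE, pvGoB]

-- the B port computes the run peel
theorem pvAlt_eq_goB (draw_log : List Int) (start_frame stop_frame : Int) :
    get_draw_epochs_py_alt draw_log start_frame stop_frame
      = pvGoB draw_log (PySem.List.pyRange start_frame stop_frame 1) := by
  unfold get_draw_epochs_py_alt
  simp only []
  have hmask : (PySem.List.pyRange start_frame stop_frame 1).map
      (fun i => PySem.List.pyGet? draw_log i == some 1) = pvMask draw_log start_frame stop_frame := by
    rfl
  rw [hmask]
  set m := pvMask draw_log start_frame stop_frame with hm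
  have hstarts : (List.range m.length).filterMap (fun i =>
      if ([false] ++ m ++ [false]).getD (i + 1) false && !(([false] ++ m ++ [false]).getD i false)
      then some (start_frame + (i : Int)) else none)
      = pvS start_frame false m := by
    rw [← pvS_filterMap m start_frame false]
    apply List.filterMap_congr
    intro i _
    have e1 : ([false] ++ m ++ [false]).getD (i + 1) false = m.getD i false := by
      rw [show [false] ++ m ++ [false] = false :: (m ++ [false]) by simp]
      rw [List.getD_cons_succ, pvGetD_append_false]
    have e2 : ([false] ++ m ++ [false]).getD i false = (false :: m).getD i false := by
      rw [show [false] ++ m ++ [false] = (false :: m) ++ [false] by simp]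
      rw [pvGetD_append_false]
    rw [e1, e2]
  have hends : (List.range m.length).filterMap (fun i =>
      if ([false] ++ m ++ [false]).getD (i + 1) false && !(([false] ++ m ++ [false]).getD (i + 2) false)
      then some (start_frame + (i : Int) + 1) else none)
      = pvE start_frame m := by
    rw [← pvE_filterMap m start_frame]
    apply List.filterMap_congr
    intro i _
    have e1 : ([false] ++ m ++ [false]).getD (i + 1) false = m.getD i false := by
      rw [show [false] ++ m ++ [false] = false :: (m ++ [false]) by simp]
      rw [List.getD_cons_succ, pvGetD_append_false]
    have e3 : ([false] ++ m ++ [false]).getD (i + 2) false = m.getD (i + 1) false := by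
      rw [show [false] ++ m ++ [false] = false :: (m ++ [false]) by simp]
      rw [List.getD_cons_succ, pvGetD_append_false]
    rw [e1, e3]
  rw [hstarts, hends]
  exact pvZipSE_eq_goB draw_log stop_frame (stop_frame - start_frame).toNat start_frame rfl

-- ===== VERDICT (by name: the statement is the Claim_ definition above) =====
theorem get_draw_epochs_py_spec : Claim_equal_get_draw_epochs_py := by
  intro draw_log start_frame stop_frame _ _
  unfold Spec_get_draw_epochs_py get_draw_epochs_py
  rw [pvOuterAGo_eq_goB draw_log stop_frame (stop_frame + 1 - start_frame).toNat start_frame []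
    (le_refl _), pvAlt_eq_goB]
  simp
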